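-- pv_equiv track=rewrite | github.com/eple0329/Algorithm | 프로그래머스/unrated/133499. 옹알이 （2）/옹알이 （2）.py | solution
-- ===== SOURCE A (Python) =====
-- def solution(babbling):
--     answer = 0
--     word = ["aya", "ye", "woo", "ma"]
--     for i in babbling:
--         start = 0
--         before = ""
--         while(True):
--             end = start
--             for j in word:
--                 if j != before:
--                     if len(j) <= len(i[start:]):
--                         if i[start:start+len(j)] == j:
--                             start += len(j)
--                             before = j
--                             break
--             if end == start:
--                 break
--             if start >= len(i):
--                 answer += 1
--                 break
--     return answer
-- ===== SOURCE B (Python) =====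
-- # Deterministic segmentation (the four words have distinct first letters) plus a
-- # forbidden doubled-substring scan, instead of A's stateful greedy pointer loop.
-- _BY_FIRST = {'a': 'aya', 'y': 'ye', 'w': 'woo', 'm': 'ma'}
-- _DOUBLES = ('ayaaya', 'yeye', 'woowoo', 'mama')
--
-- def _segments(s):
--     # s is a concatenation of one or more allowed words?
--     i, n = 0, len(s)
--     while i < n:
--         w = _BY_FIRST.get(s[i])
--         if w is None or not s.startswith(w, i):
--             return False
--         i += len(w)
--     return n > 0
--
-- def solution(babbling):
--     return sum(1 for s in babbling
--                if _segments(s) and not any(d in s for d in _DOUBLES))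
-- ===== Notes on version B (the rewrite author's own statement) =====
-- stated objective: alternative
-- what changed: A's stateful greedy pointer loop (skip the previously matched word) is replaced by two independent checks: a deterministic segmentation test keyed by the word's unique first letter (one dict lookup per position instead of scanning the word list), and a scan for the four doubled substrings 'ayaaya','yeye','woowoo','mama', which are exactly how a consecutive repeat shows up since segmentation is unique.
import Mathlib
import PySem

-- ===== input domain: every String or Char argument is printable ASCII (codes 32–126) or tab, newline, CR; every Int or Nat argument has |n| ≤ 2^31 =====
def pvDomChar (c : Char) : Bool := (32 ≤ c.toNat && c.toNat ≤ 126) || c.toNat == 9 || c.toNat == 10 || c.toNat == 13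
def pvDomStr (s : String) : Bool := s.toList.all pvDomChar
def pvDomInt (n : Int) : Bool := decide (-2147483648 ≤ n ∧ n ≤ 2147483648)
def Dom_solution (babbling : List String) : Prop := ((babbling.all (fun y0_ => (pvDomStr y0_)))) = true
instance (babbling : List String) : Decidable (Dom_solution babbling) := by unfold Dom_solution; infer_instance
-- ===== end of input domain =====

-- B replaces A's stateful greedy pointer loop (which refuses to re-match the previous
-- word in place) by two independent checks: deterministic segmentation keyed by the
-- word's unique first letter, and a scan for the four doubled substrings.

-- ===== PORT A =====
-- word = ["aya", "ye", "woo", "ma"]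
def wordsA : List (List Char) := [['a','y','a'], ['y','e'], ['w','o','o'], ['m','a']]

-- the inner `for j in word` loop: first j with j != before that is a prefix of the rest
-- (`len(j) <= len(i[start:]) and i[start:start+len(j)] == j` is exactly isPrefixOf)
def findWord : List (List Char) → List Char → List Char → Option (List Char)
  | [], _, _ => none
  | j :: ws, cs, before =>
    if j ≠ before ∧ j.isPrefixOf cs then some j else findWord ws cs before

theorem findWord_sound {ws : List (List Char)} {cs before j : List Char}
    (h : findWord ws cs before = some j) : j ∈ ws ∧ j.isPrefixOf cs := by
  induction ws with
  | nil => simp [findWord] at h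
  | cons w ws ih =>
    by_cases hc : w ≠ before ∧ w.isPrefixOf cs
    · simp [findWord, hc] at h
      subst h; exact ⟨List.mem_cons_self .., hc.2⟩
    · simp only [findWord, if_neg hc] at h
      have := ih h
      exact ⟨List.mem_cons_of_mem _ this.1, this.2⟩

theorem wordsA_pos {j : List Char} (h : j ∈ wordsA) : 0 < j.length := by
  simp [wordsA] at h
  rcases h with rfl | rfl | rfl | rfl <;> decide

-- the `while True` loop over one string: position is the remaining suffix, `before` the last word
def loopA (cs before : List Char) : Bool :=
  match h : findWord wordsA cs before with
  | none => false
  | some j =>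
    if (cs.drop j.length).isEmpty then true else loopA (cs.drop j.length) j
termination_by cs.length
decreasing_by
  have hs := findWord_sound h
  have h1 : 0 < j.length := wordsA_pos hs.1
  have h2 : j.length ≤ cs.length := (List.isPrefixOf_iff_prefix.mp hs.2).length_le
  simp only [List.length_drop]; omega

def solution (babbling : List String) : Int :=
  babbling.foldl (fun answer i => if loopA i.toList [] then answer + 1 else answer) 0

-- ===== PORT B =====
-- _BY_FIRST.get(s[i]) : the word determined by the first letter (they are all distinct)
def byFirst (c : Char) : Option (List Char) :=
  if c = 'a' then some ['a','y','a']
  else if c = 'y' then some ['y','e']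
  else if c = 'w' then some ['w','o','o']
  else if c = 'm' then some ['m','a']
  else none

theorem byFirst_pos {c : Char} {w : List Char} (h : byFirst c = some w) : 0 < w.length := by
  unfold byFirst at h
  split_ifs at h <;> (try cases h) <;> simp_all

-- `_segments`: deterministic scan; `s.startswith(w, i)` on the remaining suffix
def segLoop (cs : List Char) : Bool :=
  match cs with
  | [] => true
  | c :: t =>
    match h : byFirst c with
    | none => false
    | some w => if w.isPrefixOf (c :: t) then segLoop ((c :: t).drop w.length) else false
termination_by cs.length
decreasing_by
  have := byFirst_pos h
  simp only [List.length_drop]; simp; omega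

def segments (cs : List Char) : Bool := segLoop cs && !cs.isEmpty

-- _DOUBLES
def doubles : List (List Char) := [['a','y','a','a','y','a'], ['y','e','y','e'],
  ['w','o','o','w','o','o'], ['m','a','m','a']]

-- Python `d in s`: substring scan position by position
def isSub (d : List Char) : List Char → Bool
  | [] => d.isPrefixOf []
  | c :: t => d.isPrefixOf (c :: t) || isSub d t

def hasDouble (cs : List Char) : Bool := doubles.any (fun d => isSub d cs)

def solution_alt (babbling : List String) : Int :=
  Int.ofNat (babbling.countP (fun s => segments s.toList && !hasDouble s.toList))

-- ===== PRECONDITION & SPEC =====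
def Spec_solution (babbling : List String) (out : Int) : Prop := out = solution_alt babbling
instance (babbling : List String) (out : Int) : Decidable (Spec_solution babbling out) := by unfold Spec_solution; infer_instance

-- ===== CLAIM (what is proved, stated in full; the proofs are below) =====
def Claim_equal_solution : Prop := ∀ (babbling : List String), Dom_solution babbling → Spec_solution babbling (solution babbling)

-- ===== LEMMAS AND PROOFS =====

-- the unique segmentation of cs into words, if one exists
def toks (cs : List Char) : Option (List (List Char)) :=
  match cs with
  | [] => some []
  | c :: t =>
    match h : byFirst c with
    | none => none
    | some w =>
      if w.isPrefixOf (c :: t) then (toks ((c :: t).drop w.length)).map (w :: ·) else none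
termination_by cs.length
decreasing_by
  have := byFirst_pos h
  simp only [List.length_drop]; simp; omega

-- no two adjacent equal tokens (with `before` prepended this is A's running constraint)
def adjOK : List (List Char) → Bool
  | x :: y :: t => (x != y) && adjOK (y :: t)
  | _ => true


theorem toks_eq_none_char {c : Char} {t : List Char} (h : byFirst c = none) :
    toks (c :: t) = none := by
  rw [toks, h]

theorem toks_eq_some_char {c : Char} {t w : List Char} (h : byFirst c = some w) :
    toks (c :: t) =
      (if w.isPrefixOf (c :: t) then (toks ((c :: t).drop w.length)).map (w :: ·) else none) := by
  rw [toks, h]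

theorem segLoop_none_char {c : Char} {t : List Char} (h : byFirst c = none) :
    segLoop (c :: t) = false := by
  rw [segLoop, h]

theorem segLoop_some_char {c : Char} {t w : List Char} (h : byFirst c = some w) :
    segLoop (c :: t) =
      (if w.isPrefixOf (c :: t) then segLoop ((c :: t).drop w.length) else false) := by
  rw [segLoop, h]

theorem segLoop_eq_isSome (cs : List Char) : segLoop cs = (toks cs).isSome := by
  induction cs using segLoop.induct with
  | case1 => simp [segLoop, toks]
  | case2 c t h =>
    rw [segLoop_none_char h, toks_eq_none_char h]
    rfl
  | case3 c t w h hp ih =>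
    rw [segLoop_some_char h, toks_eq_some_char h, if_pos hp, if_pos hp, ih]
    cases toks ((c :: t).drop w.length) <;> simp
  | case4 c t w h hp =>
    rw [segLoop_some_char h, toks_eq_some_char h, if_neg hp, if_neg hp]
    rfl

theorem byFirst_mem {c : Char} {w : List Char} (h : byFirst c = some w) : w ∈ wordsA := by
  unfold byFirst at h
  split_ifs at h <;> (try cases h) <;> simp_all [wordsA]

theorem toks_flatten {cs : List Char} {l : List (List Char)} (h : toks cs = some l) :
    l.flatten = cs ∧ ∀ w ∈ l, w ∈ wordsA := by
  induction cs using toks.induct generalizing l with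
  | case1 => simp [toks] at h; subst h; simp
  | case2 c t hb => rw [toks_eq_none_char hb] at h; cases h
  | case3 c t w hb hp ih =>
    rw [toks_eq_some_char hb, if_pos hp] at h
    rcases Option.map_eq_some_iff.mp h with ⟨l', hl', rfl⟩
    obtain ⟨hfl, hmem⟩ := ih hl'
    constructor
    · have := List.prefix_iff_eq_append.mp (List.isPrefixOf_iff_prefix.mp hp)
      simpa [hfl] using this
    · intro v hv
      rcases List.mem_cons.mp hv with rfl | hv
      · exact byFirst_mem hb
      · exact hmem v hv
  | case4 c t w hb hp =>
    rw [toks_eq_some_char hb, if_neg hp] at h; cases h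

theorem toks_some_nil {cs : List Char} (h : toks cs = some []) : cs = [] := by
  cases cs with
  | nil => rfl
  | cons c t =>
    cases hb : byFirst c with
    | none => rw [toks_eq_none_char hb] at h; cases h
    | some w =>
      rw [toks_eq_some_char hb] at h
      split_ifs at h
      rcases Option.map_eq_some_iff.mp h with ⟨l', _, h2⟩; cases h2

theorem findWord_nil (before : List Char) : findWord wordsA [] before = none := by
  simp [findWord, wordsA, List.isPrefixOf]

theorem findWord_char (c : Char) (t before : List Char) :
    findWord wordsA (c :: t) before =
      (match byFirst c with
       | none => none
       | some w => if w ≠ before ∧ w.isPrefixOf (c :: t) then some w else none) := by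
  by_cases h1 : c = 'a'
  · subst h1
    rw [show byFirst 'a' = some ['a','y','a'] from by decide]
    simp only [findWord, wordsA, List.isPrefixOf,
      show (('y' : Char) == 'a') = false from by decide,
      show (('w' : Char) == 'a') = false from by decide,
      show (('m' : Char) == 'a') = false from by decide,
      Bool.false_and, Bool.and_false]
    simp
  · by_cases h2 : c = 'y'
    · subst h2
      rw [show byFirst 'y' = some ['y','e'] from by decide]
      simp only [findWord, wordsA, List.isPrefixOf,
        show (('a' : Char) == 'y') = false from by decide,
        show (('w' : Char) == 'y') = false from by decide,
        show (('m' : Char) == 'y') = false from by decide,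
        Bool.false_and, Bool.and_false]
      simp
    · by_cases h3 : c = 'w'
      · subst h3
        rw [show byFirst 'w' = some ['w','o','o'] from by decide]
        simp only [findWord, wordsA, List.isPrefixOf,
          show (('a' : Char) == 'w') = false from by decide,
          show (('y' : Char) == 'w') = false from by decide,
          show (('m' : Char) == 'w') = false from by decide,
          Bool.false_and, Bool.and_false]
        simp
      · by_cases h4 : c = 'm'
        · subst h4
          rw [show byFirst 'm' = some ['m','a'] from by decide]
          simp only [findWord, wordsA, List.isPrefixOf,
            show (('a' : Char) == 'm') = false from by decide,
            show (('y' : Char) == 'm') = false from by decide,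
            show (('w' : Char) == 'm') = false from by decide,
            Bool.false_and, Bool.and_false]
          simp
        · rw [show byFirst c = none from by simp [byFirst, h1, h2, h3, h4]]
          have ha : (('a' : Char) == c) = false := by simp [Ne.symm h1]
          have hy : (('y' : Char) == c) = false := by simp [Ne.symm h2]
          have hw : (('w' : Char) == c) = false := by simp [Ne.symm h3]
          have hm : (('m' : Char) == c) = false := by simp [Ne.symm h4]
          simp [findWord, wordsA, List.isPrefixOf, ha, hy, hw, hm]

theorem loopA_none {cs before : List Char} (h : findWord wordsA cs before = none) :
    loopA cs before = false := by
  rw [loopA, h]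

theorem loopA_some {cs before j : List Char} (h : findWord wordsA cs before = some j) :
    loopA cs before =
      (if (cs.drop j.length).isEmpty then true else loopA (cs.drop j.length) j) := by
  rw [loopA, h]

-- A's loop computes: the unique segmentation exists, is nonempty, and never repeats
-- (with `before` prepended as the word matched just before entering)
theorem loopA_toks : ∀ (n : Nat) (cs : List Char), cs.length ≤ n → ∀ (before : List Char),
    loopA cs before = (toks cs).elim false (fun l => !l.isEmpty && adjOK (before :: l)) := by
  intro n
  induction n with
  | zero =>
    intro cs hcs before
    have : cs = [] := List.length_eq_zero_iff.mp (Nat.le_zero.mp hcs)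
    subst this
    rw [loopA_none (findWord_nil before)]
    simp [toks, adjOK]
  | succ n ih =>
    intro cs hcs before
    cases cs with
    | nil =>
      rw [loopA_none (findWord_nil before)]
      simp [toks, adjOK]
    | cons c t =>
      cases hb : byFirst c with
      | none =>
        rw [loopA_none (by rw [findWord_char, hb]), toks_eq_none_char hb]
        rfl
      | some w =>
        have hwpos : 0 < w.length := byFirst_pos hb
        by_cases hp : w.isPrefixOf (c :: t)
        · by_cases hbe : w = before
          · subst hbe
            rw [loopA_none (by rw [findWord_char, hb]; simp [hp]),
              toks_eq_some_char hb, if_pos hp]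
            cases toks ((c :: t).drop w.length) <;> simp [adjOK]
          · have hf : findWord wordsA (c :: t) before = some w := by
              rw [findWord_char, hb]; simp [hp, hbe]
            rw [loopA_some hf, toks_eq_some_char hb, if_pos hp]
            have hdlen : ((c :: t).drop w.length).length ≤ n := by
              simp only [List.length_drop, List.length_cons]
              simp only [List.length_cons] at hcs
              omega
            cases hd : toks ((c :: t).drop w.length) with
            | none =>
              have hne : ¬ ((c :: t).drop w.length).isEmpty := by
                intro he
                rw [List.isEmpty_iff.mp he] at hd
                simp [toks] at hd
              rw [if_neg hne, ih _ hdlen w, hd]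
              rfl
            | some l' =>
              by_cases he : ((c :: t).drop w.length).isEmpty
              · have : l' = [] := by
                  rw [List.isEmpty_iff.mp he] at hd
                  simpa [toks] using hd.symm
                subst this
                rw [if_pos he]
                simp [adjOK, bne_iff_ne, Ne.symm hbe]
              · have hl'ne : l' ≠ [] := fun h0 => he (by
                  rw [h0] at hd
                  simp [toks_some_nil hd])
                rw [if_neg he, ih _ hdlen w, hd]
                simp only [Option.elim, Option.map_some, List.isEmpty_cons]
                rw [show adjOK (before :: w :: l') = ((before != w) && adjOK (w :: l')) from rfl]
                have h1 : l'.isEmpty = false := by simp [hl'ne]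
                have h2 : (before != w) = true := bne_iff_ne.mpr (Ne.symm hbe)
                rw [h1, h2]
                simp
        · rw [loopA_none (by rw [findWord_char, hb]; simp [hp]), toks_eq_some_char hb, if_neg hp]
          rfl

theorem isSub_iff {d cs : List Char} : isSub d cs = true ↔ d <:+: cs := by
  induction cs with
  | nil =>
    simp [isSub, List.isPrefixOf_iff_prefix]
  | cons c t ih =>
    simp [isSub, List.isPrefixOf_iff_prefix, ih, List.infix_cons_iff]

theorem hasDouble_iff {cs : List Char} : hasDouble cs = true ↔ ∃ d ∈ doubles, d <:+: cs := by
  simp [hasDouble, List.any_eq_true, isSub_iff]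

theorem adjOK_cons_false {l : List (List Char)} (w : List Char) (h : adjOK l = false) :
    adjOK (w :: l) = false := by
  cases l with
  | nil => simp [adjOK] at h
  | cons y t => simp [adjOK, h]

theorem infix_append_left {d r : List Char} (x : List Char) (h : d <:+: r) :
    d <:+: x ++ r := by
  obtain ⟨s, t, rfl⟩ := h
  exact ⟨x ++ s, t, by simp⟩

theorem doubled_mem {w : List Char} (h : w ∈ wordsA) : w ++ w ∈ doubles := by
  simp only [wordsA, List.mem_cons, List.not_mem_nil, or_false] at h
  rcases h with rfl | rfl | rfl | rfl <;> decide

theorem double_of_adj : ∀ (l : List (List Char)), (∀ w ∈ l, w ∈ wordsA) →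
    adjOK l = false → hasDouble l.flatten = true := by
  intro l
  induction l with
  | nil => intro _ h; simp [adjOK] at h
  | cons x l ih =>
    intro hmem h
    cases l with
    | nil => simp [adjOK] at h
    | cons y t =>
      rw [show adjOK (x :: y :: t) = ((x != y) && adjOK (y :: t)) from rfl] at h
      rcases Bool.and_eq_false_iff.mp h with h | h
      · have hxy : x = y := by simpa [bne_iff_ne] using h
        subst hxy
        rw [hasDouble_iff]
        exact ⟨x ++ x, doubled_mem (hmem x (List.mem_cons_self ..)),
          ⟨[], t.flatten, by simp⟩⟩
      · have := ih (fun v hv => hmem v (List.mem_cons_of_mem _ hv)) h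
        rw [hasDouble_iff] at this ⊢
        obtain ⟨d, hd, hinf⟩ := this
        exact ⟨d, hd, by simpa using infix_append_left x hinf⟩

theorem flatten_head {l : List (List Char)} (hl : ∀ w ∈ l, w ∈ wordsA) {c : Char}
    {r : List Char} (h : l.flatten = c :: r) :
    ∃ h' l'', l = h' :: l'' ∧ h' ∈ wordsA ∧ h' ++ l''.flatten = c :: r := by
  cases l with
  | nil => simp at h
  | cons x l'' =>
    exact ⟨x, l'', rfl, hl x (List.mem_cons_self ..), by simpa using h⟩

-- no word can start a segmented string that begins 'y' :: 'a'
theorem no_head_ya {l : List (List Char)} (hl : ∀ w ∈ l, w ∈ wordsA) {r : List Char}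
    (h : l.flatten = 'y' :: 'a' :: r) : False := by
  obtain ⟨h', l'', _, hh, hhe⟩ := flatten_head hl h
  simp only [wordsA, List.mem_cons, List.not_mem_nil, or_false] at hh
  rcases hh with rfl | rfl | rfl | rfl <;> simp at hhe

theorem adj_of_double : ∀ (l : List (List Char)), (∀ w ∈ l, w ∈ wordsA) →
    ∀ d ∈ doubles, d <:+: l.flatten → adjOK l = false := by
  intro l
  induction l with
  | nil =>
    intro _ d hd hinf
    rw [List.flatten_nil] at hinf
    obtain ⟨s, t, h⟩ := hinf
    simp only [List.append_eq_nil_iff] at h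
    rcases h with ⟨⟨-, rfl⟩, -⟩
    simp [doubles] at hd
  | cons w l ih =>
    intro hmem d hd hinf
    obtain ⟨s, t, heq⟩ := hinf
    rw [List.flatten_cons] at heq
    have hw : w ∈ wordsA := hmem w (List.mem_cons_self ..)
    have hmem' : ∀ v ∈ l, v ∈ wordsA := fun v hv => hmem v (List.mem_cons_of_mem _ hv)
    by_cases hlen : w.length ≤ s.length
    · have hpre1 : w <+: s ++ d ++ t := ⟨l.flatten, by simpa using heq.symm⟩
      have hpre2 : s <+: s ++ d ++ t := by
        rw [List.append_assoc]; exact List.prefix_append s (d ++ t)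
      obtain ⟨s', rfl⟩ := List.prefix_of_prefix_length_le hpre1 hpre2 hlen
      have hfl : l.flatten = s' ++ d ++ t := by
        have h2 : w ++ (s' ++ d ++ t) = w ++ l.flatten := by simpa [List.append_assoc] using heq
        exact (List.append_cancel_left h2).symm
      exact adjOK_cons_false w (ih hmem' d hd ⟨s', t, hfl.symm⟩)
    · simp only [not_le] at hlen
      simp only [wordsA, List.mem_cons, List.not_mem_nil, or_false] at hw
      simp only [doubles, List.mem_cons, List.not_mem_nil, or_false] at hd
      rcases hw with rfl | rfl | rfl | rfl <;>
        rcases s with _ | ⟨a0, _ | ⟨a1, _ | ⟨a2, s⟩⟩⟩ <;>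
        simp only [List.length_cons, List.length_nil] at hlen <;>
        try omega
      all_goals
        rcases hd with rfl | rfl | rfl | rfl <;> simp at heq <;>
        (try obtain ⟨rfl, heq⟩ := heq) <;>
        (try obtain ⟨rfl, heq⟩ := heq) <;>
        first
          | exact (no_head_ya hmem' heq.symm).elim
          | exact (no_head_ya hmem' heq).elim
          | (obtain ⟨h', l'', rfl, hh, hhe⟩ := flatten_head hmem' heq.symm
             simp only [wordsA, List.mem_cons, List.not_mem_nil, or_false] at hh
             rcases hh with rfl | rfl | rfl | rfl <;> simp at hhe
             simp [adjOK])
          | (obtain ⟨h', l'', rfl, hh, hhe⟩ := flatten_head hmem' heq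
             simp only [wordsA, List.mem_cons, List.not_mem_nil, or_false] at hh
             rcases hh with rfl | rfl | rfl | rfl <;> simp at hhe
             simp [adjOK])

theorem hasDouble_eq_adjOK {cs : List Char} {l : List (List Char)}
    (hfl : l.flatten = cs) (hmem : ∀ w ∈ l, w ∈ wordsA) :
    hasDouble cs = !adjOK l := by
  cases ha : adjOK l with
  | false => simp [← hfl, double_of_adj l hmem ha]
  | true =>
    cases hdb : hasDouble cs with
    | false => rfl
    | true =>
      exfalso
      obtain ⟨d, hd, hinf⟩ := hasDouble_iff.mp (hfl ▸ hdb)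
      rw [adj_of_double l hmem d hd hinf] at ha
      cases ha

theorem perstring (cs : List Char) :
    loopA cs [] = (segments cs && !hasDouble cs) := by
  rw [loopA_toks cs.length cs le_rfl []]
  unfold segments
  rw [segLoop_eq_isSome]
  cases h : toks cs with
  | none => simp
  | some l =>
    obtain ⟨hfl, hmem⟩ := toks_flatten h
    rw [hasDouble_eq_adjOK hfl hmem]
    cases l with
    | nil =>
      rw [toks_some_nil h]
      simp [adjOK]
    | cons x r =>
      have hx : x ≠ [] := by
        have := wordsA_pos (hmem x (List.mem_cons_self ..))
        intro h0; rw [h0] at this; simp at this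
      have hcs : ¬ cs.isEmpty := by
        rw [← hfl]
        cases x with
        | nil => exact absurd rfl hx
        | cons a b => simp
      simp only [Option.elim, Option.isSome_some, Bool.true_and, List.isEmpty_cons,
        Bool.not_false, Bool.true_and, hcs, Bool.not_eq_true', Bool.not_true,
        Bool.not_not]
      rw [show adjOK ([] :: x :: r) = (([] != x) && adjOK (x :: r)) from rfl,
        show (([] : List Char) != x) = true from bne_iff_ne.mpr (Ne.symm hx)]
      simp [hcs]

theorem foldl_count (p : String → Bool) : ∀ (l : List String) (acc : Int),
    l.foldl (fun a i => if p i then a + 1 else a) acc = acc + Int.ofNat (l.countP p) := by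
  intro l
  induction l with
  | nil => intro acc; simp
  | cons x t ih =>
    intro acc
    simp only [List.foldl_cons, List.countP_cons, ih]
    by_cases h : p x <;> simp [h] <;> omega

-- ===== VERDICT (by name: the statement is the Claim_ definition above) =====
theorem solution_spec : Claim_equal_solution := by
  intro babbling _
  unfold Spec_solution solution solution_alt
  have hfun : (fun (a : Int) (i : String) => if loopA i.toList [] then a + 1 else a)
      = (fun (a : Int) (i : String) =>
          if (segments i.toList && !hasDouble i.toList) then a + 1 else a) := by
    funext a i
    rw [perstring]
  rw [hfun, foldl_count]
  simp
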